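-- pv_equiv track=rewrite | github.com/Datalab-AUTH/encoviz | backend/modules.py | get_sequence_list
-- ===== SOURCE A (Python) =====
-- def get_sequence_list(data):
--     seqList = []
--     seqList2 = []
--     seq = []
--     for i in data:
--         if i == 0:
--             seqList.append(seq)
--             seq = []
--         else:
--             seq.append(i)
--     if len(seq):
--         seqList.append(seq)
--
--     for l in seqList:
--         if len(l) > 0:
--             seqList2.append(l)
--     return seqList2
-- ===== SOURCE B (Python) =====
-- def get_sequence_list(data):
--     out = []
--     n = len(data)
--     i = 0
--     while i < n:
--         if data[i] == 0:
--             i += 1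
--         else:
--             j = i + 1
--             while j < n and data[j] != 0:
--                 j += 1
--             out.append(data[i:j])
--             i = j
--     return out
-- ===== Notes on version B (the rewrite author's own statement) =====
-- stated objective: alternative
-- what changed: Replaces A's accumulate-runs-then-filter two-pass state machine with a single index scan that skips zeros and, for each run, advances an inner pointer to the run's end and emits the slice data[i:j] directly.
import Mathlib
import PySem

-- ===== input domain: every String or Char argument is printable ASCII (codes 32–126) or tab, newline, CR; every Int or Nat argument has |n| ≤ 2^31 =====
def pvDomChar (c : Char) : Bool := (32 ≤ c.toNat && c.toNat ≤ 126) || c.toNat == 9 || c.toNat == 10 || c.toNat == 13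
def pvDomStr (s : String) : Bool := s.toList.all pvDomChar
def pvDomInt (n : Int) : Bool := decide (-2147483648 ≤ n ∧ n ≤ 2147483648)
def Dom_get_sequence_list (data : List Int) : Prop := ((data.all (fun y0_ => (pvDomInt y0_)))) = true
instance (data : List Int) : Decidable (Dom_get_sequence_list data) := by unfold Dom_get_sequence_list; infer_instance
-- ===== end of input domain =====

-- B is an alternative single index scan that skips zeros and emits each maximal
-- nonzero run directly as a slice; A accumulates runs (including empties) and filters.

-- ===== PORT A =====
def get_sequence_list (data : List Int) : List (List Int) :=
  let st := data.foldl
    (fun (p : List (List Int) × List Int) i =>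
      if i = 0 then (p.1 ++ [p.2], ([] : List Int)) else (p.1, p.2 ++ [i]))
    ([], [])
  let seqList := if st.2.length ≠ 0 then st.1 ++ [st.2] else st.1
  seqList.foldl (fun acc l => if l.length > 0 then acc ++ [l] else acc) []

-- ===== PORT B =====
-- inner while loop of Source B: advance j to the end of the current nonzero run
def altFind (data : List Int) (n j : Nat) : Nat :=
  if h : j < n ∧ data.getD j 0 ≠ 0 then altFind data n (j + 1) else j
termination_by n - j
decreasing_by omega

-- port-level fact needed only for altMain's termination
theorem altFind_ge (data : List Int) (n j : Nat) : j ≤ altFind data n j := by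
  by_cases h : j < n ∧ data.getD j 0 ≠ 0
  · rw [altFind, dif_pos h]
    have := altFind_ge data n (j + 1); omega
  · rw [altFind, dif_neg h]
termination_by n - j
decreasing_by omega

-- outer while loop of Source B
def altMain (data : List Int) (n i : Nat) (out : List (List Int)) : List (List Int) :=
  if _h : i < n then
    if data.getD i 0 = 0 then altMain data n (i + 1) out
    else
      altMain data n (altFind data n (i + 1))
        (out ++ [PySem.List.slice data (some (i : Int)) (some ((altFind data n (i + 1) : Nat) : Int))])
  else out
termination_by n - i
decreasing_by
  · omega
  · have := altFind_ge data n (i + 1); omega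

def get_sequence_list_alt (data : List Int) : List (List Int) :=
  altMain data data.length 0 []

-- ===== PRECONDITION & SPEC =====
def Spec_get_sequence_list (data : List Int) (out : List (List Int)) : Prop := out = get_sequence_list_alt data
instance (data : List Int) (out : List (List Int)) : Decidable (Spec_get_sequence_list data out) := by unfold Spec_get_sequence_list; infer_instance

-- ===== CLAIM (what is proved, stated in full; the proofs are below) =====
def Claim_equal_get_sequence_list : Prop := ∀ (data : List Int), Dom_get_sequence_list data → Spec_get_sequence_list data (get_sequence_list data)

-- ===== LEMMAS AND PROOFS =====

-- common characterization: the list of maximal nonzero runs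
def runsG : List Int → List (List Int)
  | [] => []
  | x :: xs =>
    if x = 0 then runsG xs
    else (x :: xs.takeWhile (fun y => decide (y ≠ 0))) :: runsG (xs.dropWhile (fun y => decide (y ≠ 0)))
termination_by l => l.length
decreasing_by
  · simp
  · have := List.length_dropWhile_le (fun y => decide (y ≠ 0)) xs
    simp only [List.length_cons]; omega

-- A-side bridge: final filtered result as a function of the pending run
def runsH : List Int → List Int → List (List Int)
  | [], cur => if cur.length ≠ 0 then [cur] else []
  | x :: xs, cur =>
    if x = 0 then (if cur.length > 0 then [cur] else []) ++ runsH xs []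
    else runsH xs (cur ++ [x])

def stepA (p : List (List Int) × List Int) (i : Int) : List (List Int) × List Int :=
  if i = 0 then (p.1 ++ [p.2], ([] : List Int)) else (p.1, p.2 ++ [i])

theorem foldA_growth (xs : List Int) (acc : List (List Int)) (cur : List Int) :
    xs.foldl stepA (acc, cur) =
      (acc ++ (xs.foldl stepA ([], cur)).1, (xs.foldl stepA ([], cur)).2) := by
  induction xs generalizing acc cur with
  | nil => simp
  | cons x xs ih =>
    simp only [List.foldl_cons, stepA]
    by_cases hx : x = 0
    · simp only [hx, if_true, List.nil_append]
      rw [ih (acc ++ [cur]) [], ih [cur] []]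
      simp
    · simp only [hx, if_false, List.nil_append]
      exact ih acc (cur ++ [x])

theorem foldFilt (l : List (List Int)) (init : List (List Int)) :
    l.foldl (fun acc l => if l.length > 0 then acc ++ [l] else acc) init =
      init ++ l.filter (fun x => decide (x.length > 0)) := by
  induction l generalizing init with
  | nil => simp
  | cons x xs ih =>
    simp only [List.foldl_cons, List.filter_cons]
    by_cases hx : x.length > 0
    · simp [hx, ih]
    · simp [hx, ih]

def finA (p : List (List Int) × List Int) : List (List Int) :=
  if p.2.length ≠ 0 then p.1 ++ [p.2] else p.1

theorem A_runsH (xs : List Int) (cur : List Int) :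
    (finA (xs.foldl stepA ([], cur))).filter (fun x => decide (x.length > 0)) =
      runsH xs cur := by
  induction xs generalizing cur with
  | nil =>
    simp only [List.foldl_nil, finA, runsH]
    by_cases h : cur.length ≠ 0
    · have : cur.length > 0 := by omega
      simp [h, this]
    · simp [h]
  | cons x xs ih =>
    simp only [List.foldl_cons, stepA, runsH]
    by_cases hx : x = 0
    · simp only [hx, if_true, List.nil_append]
      rw [foldA_growth xs [cur] []]
      have hfin : finA ([cur] ++ (xs.foldl stepA ([], [])).1, (xs.foldl stepA ([], [])).2)
          = [cur] ++ finA (xs.foldl stepA ([], [])) := by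
        unfold finA
        by_cases h2 : (xs.foldl stepA ([], ([] : List Int))).2.length ≠ 0 <;> simp [h2]
      rw [hfin, List.filter_append, ih []]
      by_cases hc : cur.length > 0
      · simp [hc]
      · have hnil : cur = [] := List.length_eq_zero_iff.mp (by omega)
        simp [hnil]
    · simp only [hx, if_false, List.nil_append]
      exact ih (cur ++ [x])

theorem A_eq_runsG_aux (xs : List Int) (cur : List Int) :
    runsH xs cur =
      if cur = [] then runsG xs
      else (cur ++ xs.takeWhile (fun y => decide (y ≠ 0))) :: runsG (xs.dropWhile (fun y => decide (y ≠ 0))) := by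
  induction xs generalizing cur with
  | nil =>
    by_cases hc : cur = []
    · simp [runsH, runsG, hc]
    · have : cur.length ≠ 0 := fun h => hc (List.length_eq_zero_iff.mp h)
      simp [runsH, runsG, hc, this]
  | cons x xs ih =>
    by_cases hx : x = 0
    · subst hx
      by_cases hc : cur = []
      · simp [runsH, runsG, hc, ih]
      · have hl : cur.length > 0 := List.length_pos_iff.mpr hc
        simp [runsH, runsG, hc, hl, ih]
    · by_cases hc : cur = []
      · subst hc
        rw [runsH, if_neg hx, List.nil_append, ih [x]]
        simp [runsG, hx]
      · rw [runsH, if_neg hx, ih (cur ++ [x])]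
        simp [hx, hc]

theorem A_eq_runsG (data : List Int) : get_sequence_list data = runsG data := by
  have h1 : get_sequence_list data
      = (finA (data.foldl stepA ([], []))).filter (fun x => decide (x.length > 0)) := by
    unfold get_sequence_list finA stepA
    rw [foldFilt]
    simp
  rw [h1, A_runsH, A_eq_runsG_aux]
  simp

-- B-side lemmas
theorem dropWhile_eq_drop_takeWhile {a : Type} (p : a → Bool) (l : List a) :
    l.dropWhile p = l.drop (l.takeWhile p).length := by
  induction l with
  | nil => simp
  | cons x xs ih =>
    by_cases hx : p x <;> simp [hx, ih]

theorem take_takeWhile_length {a : Type} (p : a → Bool) (l : List a) :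
    l.take (l.takeWhile p).length = l.takeWhile p := by
  induction l with
  | nil => simp
  | cons x xs ih =>
    by_cases hx : p x <;> simp [hx, ih]

theorem altFind_spec (data : List Int) (j : Nat) :
    altFind data data.length j = j + ((data.drop j).takeWhile (fun y => decide (y ≠ 0))).length := by
  by_cases h : j < data.length ∧ data.getD j 0 ≠ 0
  · rw [altFind, dif_pos h]
    rw [altFind_spec data (j + 1)]
    rw [List.drop_eq_getElem_cons h.1, List.takeWhile_cons]
    have hne : data[j] ≠ 0 := by
      have := h.2; rwa [List.getD_eq_getElem data 0 h.1] at this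
    simp [hne]
    omega
  · rw [altFind, dif_neg h]
    rcases Decidable.not_and_iff_not_or_not.mp h with h1 | h2
    · have : data.length ≤ j := by omega
      simp [List.drop_eq_nil_of_le this]
    · by_cases h1 : j < data.length
      · rw [List.drop_eq_getElem_cons h1, List.takeWhile_cons]
        have h0 : data[j] = 0 := by
          have := not_not.mp h2; rwa [List.getD_eq_getElem data 0 h1] at this
        simp [h0]
      · have : data.length ≤ j := by omega
        simp [List.drop_eq_nil_of_le this]
termination_by data.length - j
decreasing_by omega

theorem altMain_spec (data : List Int) (i : Nat) (out : List (List Int)) :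
    altMain data data.length i out = out ++ runsG (data.drop i) := by
  by_cases h : i < data.length
  · rw [altMain, dif_pos h]
    have hdrop : data.drop i = data[i] :: data.drop (i + 1) := List.drop_eq_getElem_cons h
    by_cases h0 : data.getD i 0 = 0
    · have h0' : data[i] = 0 := by rwa [List.getD_eq_getElem data 0 h] at h0
      simp only [h0, if_true]
      rw [altMain_spec data (i + 1) out, hdrop, runsG, h0']
      simp
    · have h0' : data[i] ≠ 0 := by rwa [List.getD_eq_getElem data 0 h] at h0
      simp only [h0, if_false]
      rw [altMain_spec data (altFind data data.length (i + 1)) _]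
      rw [altFind_spec data (i + 1)]
      have hslice : PySem.List.slice data (some (i : Int)) (some (((i + 1 + ((data.drop (i+1)).takeWhile (fun y => decide (y ≠ 0))).length : Nat) : Int)))
          = data[i] :: (data.drop (i + 1)).takeWhile (fun y => decide (y ≠ 0)) := by
        rw [PySem.List.slice_natCast]
        have : i + 1 + ((data.drop (i+1)).takeWhile (fun y => decide (y ≠ 0))).length - i
            = ((data.drop (i+1)).takeWhile (fun y => decide (y ≠ 0))).length + 1 := by omega
        rw [this, hdrop, List.take_succ_cons, take_takeWhile_length]
      rw [hslice]
      have hdropj : data.drop (i + 1 + ((data.drop (i+1)).takeWhile (fun y => decide (y ≠ 0))).length)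
          = (data.drop (i + 1)).dropWhile (fun y => decide (y ≠ 0)) := by
        rw [dropWhile_eq_drop_takeWhile, List.drop_drop]
      rw [hdropj, hdrop, runsG]
      simp only [h0', if_false]
      simp
  · rw [altMain, dif_neg h]
    have : data.length ≤ i := by omega
    simp [List.drop_eq_nil_of_le this, runsG]
termination_by data.length - i
decreasing_by
  · omega
  · have := altFind_ge data data.length (i + 1); omega

theorem B_eq_runsG (data : List Int) : get_sequence_list_alt data = runsG data := by
  unfold get_sequence_list_alt
  rw [altMain_spec]
  simp

-- ===== VERDICT (by name: the statement is the Claim_ definition above) =====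
theorem get_sequence_list_spec : Claim_equal_get_sequence_list := by
  intro data _
  unfold Spec_get_sequence_list
  rw [A_eq_runsG, B_eq_runsG]
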